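-- pv_equiv track=rewrite | github.com/Arsen1302/Code-copy-detector | TestData/solutions/problem_845_3.py | solution_845_3
-- ===== SOURCE A (Python) =====
-- from typing import List
--
-- def solution_845_3(low: int, high: int) -> List[int]:
--     num = []
--     for x in range(1,9):
--         while x <= high:
--             r = x % 10
--
--             if r == 0:
--                 break
--
--             if x >= low:
--                 num.append(x)
--
--             x = (x * 10) + r + 1
--
--
--     return sorted(num)
-- ===== SOURCE B (Python) =====
-- def solution_845_3(low: int, high: int):
--     s = "123456789"
--     result = []
--     for i in range(8):
--         for j in range(i + 1, 10):
--             n = int(s[i:j])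
--             if low <= n <= high:
--                 result.append(n)
--     return sorted(result)
-- ===== Notes on version B (the rewrite author's own statement) =====
-- stated objective: idiomatic
-- what changed: B builds every sequential-digit number by slicing substrings of the fixed string "123456789" (start index 0..7, all end indices) and filtering low <= n <= high, instead of A's while loop that grows x arithmetically via x = x*10 + x%10 + 1 with a break on a trailing-9/over-high condition.
import Mathlib
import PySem

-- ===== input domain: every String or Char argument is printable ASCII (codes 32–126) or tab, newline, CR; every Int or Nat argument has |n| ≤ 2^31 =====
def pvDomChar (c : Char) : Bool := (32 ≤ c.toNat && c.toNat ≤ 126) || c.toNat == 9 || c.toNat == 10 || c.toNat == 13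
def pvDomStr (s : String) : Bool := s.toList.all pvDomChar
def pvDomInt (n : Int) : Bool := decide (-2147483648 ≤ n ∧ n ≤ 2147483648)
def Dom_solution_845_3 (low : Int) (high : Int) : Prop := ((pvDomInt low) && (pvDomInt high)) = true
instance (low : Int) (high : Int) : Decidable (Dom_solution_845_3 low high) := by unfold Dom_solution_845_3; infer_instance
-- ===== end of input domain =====

-- B replaces A's interleaved arithmetic build (x = x*10 + x%10 + 1 with break) by extracting
-- every substring of the fixed string "123456789" and filtering the range test (idiomatic, same cost).

-- ===== PORT A =====
-- the while loop of A; fuel 10 is an upper bound on its iterations (each pass appends a digit,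
-- and after the digit 9 the next remainder is 0 and the loop breaks), so the port is exact.
def pvWhileA (low : Int) (high : Int) (x : Int) : Nat → List Int
  | 0 => []
  | fuel + 1 =>
    if x ≤ high then
      let r := PySem.Int.mod x 10
      if r == 0 then []
      else (if x ≥ low then [x] else []) ++ pvWhileA low high ((x * 10) + r + 1) fuel
    else []

def solution_845_3 (low : Int) (high : Int) : List Int :=
  PySem.List.sorted
    ((PySem.List.pyRange 1 9 1).foldl (fun num x => num ++ pvWhileA low high x 10) [])
    (fun v => v) false

-- ===== PORT B =====
-- int(s[i:j]) never raises here (the slice is a nonempty digit string), so '.getD 0' is an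
-- unreachable default for the Option of PySem.Int.ofStr?.
def solution_845_3_alt (low : Int) (high : Int) : List Int :=
  let s := "123456789"
  let result := (PySem.List.pyRange 0 8 1).foldl (fun res i =>
    (PySem.List.pyRange (i + 1) 10 1).foldl (fun res j =>
      let n := (PySem.Int.ofStr? (PySem.Str.slice s (some i) (some j))).getD 0
      if low ≤ n ∧ n ≤ high then res ++ [n] else res) res) []
  PySem.List.sorted result (fun v => v) false

-- ===== PRECONDITION & SPEC =====
def Spec_solution_845_3 (low : Int) (high : Int) (out : List Int) : Prop := out = solution_845_3_alt low high
instance (low : Int) (high : Int) (out : List Int) : Decidable (Spec_solution_845_3 low high out) := by unfold Spec_solution_845_3; infer_instance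

-- ===== CLAIM (what is proved, stated in full; the proofs are below) =====
def Claim_equal_solution_845_3 : Prop := ∀ (low : Int) (high : Int), Dom_solution_845_3 low high → Spec_solution_845_3 low high (solution_845_3 low high)

-- ===== LEMMAS AND PROOFS =====

-- the chain of sequential-digit numbers A's while loop walks, independent of low/high
def pvChain (x : Int) : Nat → List Int
  | 0 => []
  | f + 1 =>
    if PySem.Int.mod x 10 == 0 then []
    else x :: pvChain ((x * 10) + PySem.Int.mod x 10 + 1) f

theorem pvWhileA_eq_takeWhile_filter (low high x : Int) (f : Nat) :
    pvWhileA low high x f =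
      ((pvChain x f).takeWhile (fun v => decide (v ≤ high))).filter (fun v => decide (low ≤ v)) := by
  induction f generalizing x with
  | zero => simp [pvWhileA, pvChain]
  | succ f ih =>
    simp only [pvWhileA, pvChain]
    by_cases hd : (10 : Int) ∣ x
    · simp [hd]
    · by_cases hh : x ≤ high
      · by_cases hl : low ≤ x <;>
          simp [hd, hh, hl, ih, ge_iff_le]
      · simp [hd, hh]

theorem takeWhile_le_eq_filter (hi : Int) :
    ∀ (l : List Int), l.Pairwise (· ≤ ·) →
      l.takeWhile (fun v => decide (v ≤ hi)) = l.filter (fun v => decide (v ≤ hi)) := by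
  intro l hl
  induction l with
  | nil => rfl
  | cons a t ih =>
    rcases List.pairwise_cons.mp hl with ⟨ha, ht⟩
    by_cases h : a ≤ hi
    · simp [h, ih ht]
    · simp only [List.takeWhile_cons, h, decide_false, Bool.false_eq_true,
        List.filter_cons, ite_false]
      refine (List.filter_eq_nil_iff.mpr ?_).symm
      intro b hb
      simp only [decide_eq_true_eq]
      exact fun hb' => h (le_trans (ha b hb) hb')

-- A's while loop from start x is the range filter of its fixed chain (chain sortedness supplied per start digit)
theorem pvWhileA_eq_filter (low high x : Int)
    (h : (pvChain x 10).Pairwise (· ≤ ·)) :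
    pvWhileA low high x 10 = (pvChain x 10).filter (fun v => decide (low ≤ v ∧ v ≤ high)) := by
  rw [pvWhileA_eq_takeWhile_filter, takeWhile_le_eq_filter high _ h, List.filter_filter]
  apply List.filter_congr
  intro v _
  by_cases h1 : low ≤ v <;> by_cases h2 : v ≤ high <;> simp [h1, h2]

-- ===== VERDICT (by name: the statement is the Claim_ definition above) =====
theorem solution_845_3_spec : Claim_equal_solution_845_3 := by
  intro low high _
  show solution_845_3 low high = solution_845_3_alt low high
  unfold solution_845_3 solution_845_3_alt
  congr 1
  have hA : PySem.List.pyRange 1 9 1 = [1, 2, 3, 4, 5, 6, 7, 8] := by decide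
  have hB : PySem.List.pyRange 0 8 1 = [0, 1, 2, 3, 4, 5, 6, 7] := by decide
  rw [hA, hB]
  simp only [List.foldl_cons, List.foldl_nil]
  -- B's inner loop over j is an append of the filtered digit chain
  have key : ∀ (i : Int) (res : List Int),
      (PySem.List.pyRange (i + 1) 10 1).foldl (fun res j =>
        let n := (PySem.Int.ofStr? (PySem.Str.slice "123456789" (some i) (some j))).getD 0
        if low ≤ n ∧ n ≤ high then res ++ [n] else res) res
      = res ++ ((PySem.List.pyRange (i + 1) 10 1).map
          (fun j => (PySem.Int.ofStr? (PySem.Str.slice "123456789" (some i) (some j))).getD 0)).filter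
            (fun n => decide (low ≤ n ∧ n ≤ high)) := by
    intro i res
    have h := PySem.List.foldl_append_if
      (fun j => decide (low ≤ (PySem.Int.ofStr? (PySem.Str.slice "123456789" (some i) (some j))).getD 0 ∧
        (PySem.Int.ofStr? (PySem.Str.slice "123456789" (some i) (some j))).getD 0 ≤ high))
      (fun j => (PySem.Int.ofStr? (PySem.Str.slice "123456789" (some i) (some j))).getD 0)
      (PySem.List.pyRange (i + 1) 10 1) res
    simp only [decide_eq_true_eq] at h
    rw [h, List.filter_map]
    simp [Function.comp_def]
  rw [key 0, key 1, key 2, key 3, key 4, key 5, key 6, key 7]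
  -- each mapped range of substrings is the digit chain from its start digit
  have hM : ∀ i ∈ ([0, 1, 2, 3, 4, 5, 6, 7] : List Int),
      ((PySem.List.pyRange (i + 1) 10 1).map
        (fun j => (PySem.Int.ofStr? (PySem.Str.slice "123456789" (some i) (some j))).getD 0))
      = pvChain (i + 1) 10 := by decide
  rw [hM 0 (by decide), hM 1 (by decide), hM 2 (by decide), hM 3 (by decide),
      hM 4 (by decide), hM 5 (by decide), hM 6 (by decide), hM 7 (by decide)]
  have hP : ∀ d ∈ ([1, 2, 3, 4, 5, 6, 7, 8] : List Int), (pvChain d 10).Pairwise (· ≤ ·) := by decide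
  rw [pvWhileA_eq_filter low high 1 (hP 1 (by decide)), pvWhileA_eq_filter low high 2 (hP 2 (by decide)),
      pvWhileA_eq_filter low high 3 (hP 3 (by decide)), pvWhileA_eq_filter low high 4 (hP 4 (by decide)),
      pvWhileA_eq_filter low high 5 (hP 5 (by decide)), pvWhileA_eq_filter low high 6 (hP 6 (by decide)),
      pvWhileA_eq_filter low high 7 (hP 7 (by decide)), pvWhileA_eq_filter low high 8 (hP 8 (by decide))]
  norm_num
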